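-- pv_equiv track=rewrite | github.com/ahines99/Personal-Trading-Portfolio-Project | validate_tradier_orats.py | _bracket
-- ===== SOURCE A (Python) =====
-- from typing import Dict, List, Optional, Tuple
--
-- def _bracket(dtes: List[int], target: int) -> Optional[Tuple[int, int]]:
--     if not dtes:
--         return None
--     s = sorted(set(dtes))
--     if len(s) == 1:
--         return (s[0], s[0])
--     below = [d for d in s if d <= target]
--     above = [d for d in s if d >= target]
--     if below and above:
--         return (max(below), min(above))
--     return (s[0], s[1]) if not below else (s[-2], s[-1])
-- ===== SOURCE B (Python) =====
-- def _bracket(dtes, target):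
--     if not dtes:
--         return None
--     lo = None  # largest value <= target seen so far
--     hi = None  # smallest value >= target seen so far
--     for d in dtes:
--         if d <= target:
--             if lo is None or lo < d:
--                 lo = d
--         if d >= target:
--             if hi is None or d < hi:
--                 hi = d
--     if lo is not None and hi is not None:
--         return (lo, hi)
--     if lo is None:  # every value is above target: two smallest distinct values
--         m1 = min(dtes)
--         rest = [d for d in dtes if d != m1]
--         return (m1, min(rest)) if rest else (m1, m1)
--     m2 = max(dtes)  # every value is below target: two largest distinct values
--     rest = [d for d in dtes if d != m2]
--     return (max(rest), m2) if rest else (m2, m2)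
-- ===== Notes on version B (the rewrite author's own statement) =====
-- stated objective: faster
-- what changed: B replaces A's sorted(set(dtes)) plus two filtered passes over the sorted distinct values by a single linear pass that tracks the largest value <= target and the smallest value >= target, falling back to min/max scans for the one-sided cases.
import Mathlib
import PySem

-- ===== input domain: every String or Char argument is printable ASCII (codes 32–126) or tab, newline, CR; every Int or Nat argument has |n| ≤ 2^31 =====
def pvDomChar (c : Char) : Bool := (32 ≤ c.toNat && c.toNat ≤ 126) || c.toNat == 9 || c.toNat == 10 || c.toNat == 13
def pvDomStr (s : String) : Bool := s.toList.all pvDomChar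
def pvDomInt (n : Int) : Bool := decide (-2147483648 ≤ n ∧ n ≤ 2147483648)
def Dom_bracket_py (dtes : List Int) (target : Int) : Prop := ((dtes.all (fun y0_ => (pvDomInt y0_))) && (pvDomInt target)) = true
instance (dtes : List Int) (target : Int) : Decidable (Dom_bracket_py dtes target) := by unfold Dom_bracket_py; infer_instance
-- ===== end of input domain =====

-- B replaces A's sort-the-distinct-values approach by a single linear pass (plus min/max fallback scans).


-- ===== PORT A =====
-- out-of-range indexing cannot occur on the branches A takes; `.getD 0` only totalizes pyGet?
def bracket_py (dtes : List Int) (target : Int) : Option (List Int) :=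
  if dtes = [] then none
  else
    let s := PySem.List.sorted (PySem.Set.ofList dtes) (fun x => x) false
    if s.length = 1 then
      some [(PySem.List.pyGet? s 0).getD 0, (PySem.List.pyGet? s 0).getD 0]
    else
      let below := s.filter (fun d => decide (d ≤ target))
      let above := s.filter (fun d => decide (target ≤ d))
      if below ≠ [] ∧ above ≠ [] then
        some [(PySem.List.max? below (fun x => x)).getD 0,
              (PySem.List.min? above (fun x => x)).getD 0]
      else if below = [] then
        some [(PySem.List.pyGet? s 0).getD 0, (PySem.List.pyGet? s 1).getD 0]
      else
        some [(PySem.List.pyGet? s (-2)).getD 0, (PySem.List.pyGet? s (-1)).getD 0]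

-- ===== PORT B =====
-- one loop step: lo := d if d <= target and (lo is None or lo < d)
def bracketStepLo (target : Int) (lo : Option Int) (d : Int) : Option Int :=
  if d ≤ target then
    match lo with
    | none => some d
    | some l => if l < d then some d else some l
  else lo

-- one loop step: hi := d if d >= target and (hi is None or d < hi)
def bracketStepHi (target : Int) (hi : Option Int) (d : Int) : Option Int :=
  if target ≤ d then
    match hi with
    | none => some d
    | some h => if d < h then some d else some h
  else hi

def bracket_py_alt (dtes : List Int) (target : Int) : Option (List Int) :=
  if dtes = [] then none
  else
    let p := dtes.foldl
      (fun (p : Option Int × Option Int) d =>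
        (bracketStepLo target p.1 d, bracketStepHi target p.2 d)) (none, none)
    match p.1, p.2 with
    | some l, some h => some [l, h]
    | none, _ =>
      -- every value is above target: two smallest distinct values
      let m1 := (PySem.List.min? dtes (fun x => x)).getD 0
      let rest := dtes.filter (fun d => decide (d ≠ m1))
      if rest = [] then some [m1, m1]
      else some [m1, (PySem.List.min? rest (fun x => x)).getD 0]
    | some _, none =>
      -- every value is below target: two largest distinct values
      let m2 := (PySem.List.max? dtes (fun x => x)).getD 0
      let rest := dtes.filter (fun d => decide (d ≠ m2))
      if rest = [] then some [m2, m2]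
      else some [(PySem.List.max? rest (fun x => x)).getD 0, m2]

-- ===== PRECONDITION & SPEC =====
def Spec_bracket_py (dtes : List Int) (target : Int) (out : Option (List Int)) : Prop := out = bracket_py_alt dtes target
instance (dtes : List Int) (target : Int) (out : Option (List Int)) : Decidable (Spec_bracket_py dtes target out) := by unfold Spec_bracket_py; infer_instance

-- ===== CLAIM (what is proved, stated in full; the proofs are below) =====
def Claim_equal_bracket_py : Prop := ∀ (dtes : List Int) (target : Int), Dom_bracket_py dtes target → Spec_bracket_py dtes target (bracket_py dtes target)

-- ===== LEMMAS AND PROOFS =====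

-- the pair fold in B is the two independent folds
theorem bracket_fold_pair (target : Int) (l : List Int) (a b : Option Int) :
    l.foldl (fun (p : Option Int × Option Int) d =>
        (bracketStepLo target p.1 d, bracketStepHi target p.2 d)) (a, b)
      = (l.foldl (bracketStepLo target) a, l.foldl (bracketStepHi target) b) :=
  PySem.List.foldl_prod_mk (bracketStepLo target) (bracketStepHi target) l a b

theorem bracket_lo_fold_some (target : Int) :
    ∀ (l : List Int) (a : Int), a ≤ target →
      ∃ m, l.foldl (bracketStepLo target) (some a) = some m ∧ m ≤ target ∧ a ≤ m ∧
        (m = a ∨ m ∈ l) ∧ ∀ d ∈ l, d ≤ target → d ≤ m := by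
  intro l
  induction l with
  | nil => intro a ha; exact ⟨a, rfl, ha, le_refl a, Or.inl rfl, by simp⟩
  | cons d t ih =>
    intro a ha
    by_cases hd : d ≤ target
    · by_cases hlt : a < d
      · obtain ⟨m, hm, hmt, hdm, hmem, hmax⟩ := ih d hd
        refine ⟨m, ?_, hmt, le_of_lt (lt_of_lt_of_le hlt hdm), ?_, ?_⟩
        · simpa [List.foldl_cons, bracketStepLo, hd, hlt] using hm
        · rcases hmem with h | h
          · exact Or.inr (by simp [h])
          · exact Or.inr (List.mem_cons_of_mem _ h)
        · intro e he het
          rcases List.mem_cons.mp he with rfl | he'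
          · exact hdm
          · exact hmax e he' het
      · obtain ⟨m, hm, hmt, ham, hmem, hmax⟩ := ih a ha
        refine ⟨m, ?_, hmt, ham, ?_, ?_⟩
        · simpa [List.foldl_cons, bracketStepLo, hd, hlt] using hm
        · rcases hmem with h | h
          · exact Or.inl h
          · exact Or.inr (List.mem_cons_of_mem _ h)
        · intro e he het
          rcases List.mem_cons.mp he with rfl | he'
          · exact le_trans (le_of_not_gt hlt) ham
          · exact hmax e he' het
    · obtain ⟨m, hm, hmt, ham, hmem, hmax⟩ := ih a ha
      refine ⟨m, ?_, hmt, ham, ?_, ?_⟩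
      · simpa [List.foldl_cons, bracketStepLo, hd] using hm
      · rcases hmem with h | h
        · exact Or.inl h
        · exact Or.inr (List.mem_cons_of_mem _ h)
      · intro e he het
        rcases List.mem_cons.mp he with rfl | he'
        · exact absurd het hd
        · exact hmax e he' het

theorem bracket_lo_fold (target : Int) :
    ∀ (l : List Int),
      (l.foldl (bracketStepLo target) none = none ∧ ∀ d ∈ l, target < d) ∨
      (∃ m, l.foldl (bracketStepLo target) none = some m ∧ m ∈ l ∧ m ≤ target ∧
        ∀ d ∈ l, d ≤ target → d ≤ m) := by
  intro l
  induction l with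
  | nil => exact Or.inl ⟨rfl, by simp⟩
  | cons d t ih =>
    by_cases hd : d ≤ target
    · obtain ⟨m, hm, hmt, hdm, hmem, hmax⟩ := bracket_lo_fold_some target t d hd
      refine Or.inr ⟨m, ?_, ?_, hmt, ?_⟩
      · simpa [List.foldl_cons, bracketStepLo, hd] using hm
      · rcases hmem with h | h
        · exact h ▸ List.mem_cons_self
        · exact List.mem_cons_of_mem _ h
      · intro e he het
        rcases List.mem_cons.mp he with rfl | he'
        · exact hdm
        · exact hmax e he' het
    · have hstep : List.foldl (bracketStepLo target) none (d :: t)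
          = List.foldl (bracketStepLo target) none t := by
        simp [List.foldl_cons, bracketStepLo, hd]
      rcases ih with ⟨hn, hall⟩ | ⟨m, hm, hmem, hmt, hmax⟩
      · refine Or.inl ⟨hstep ▸ hn, ?_⟩
        intro e he
        rcases List.mem_cons.mp he with rfl | he'
        · exact lt_of_not_ge hd
        · exact hall e he'
      · refine Or.inr ⟨m, hstep ▸ hm, List.mem_cons_of_mem _ hmem, hmt, ?_⟩
        intro e he het
        rcases List.mem_cons.mp he with rfl | he'
        · exact absurd het hd
        · exact hmax e he' het

theorem bracket_hi_fold_some (target : Int) :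
    ∀ (l : List Int) (a : Int), target ≤ a →
      ∃ m, l.foldl (bracketStepHi target) (some a) = some m ∧ target ≤ m ∧ m ≤ a ∧
        (m = a ∨ m ∈ l) ∧ ∀ d ∈ l, target ≤ d → m ≤ d := by
  intro l
  induction l with
  | nil => intro a ha; exact ⟨a, rfl, ha, le_refl a, Or.inl rfl, by simp⟩
  | cons d t ih =>
    intro a ha
    by_cases hd : target ≤ d
    · by_cases hlt : d < a
      · obtain ⟨m, hm, hmt, hdm, hmem, hmin⟩ := ih d hd
        refine ⟨m, ?_, hmt, le_of_lt (lt_of_le_of_lt hdm hlt), ?_, ?_⟩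
        · simpa [List.foldl_cons, bracketStepHi, hd, hlt] using hm
        · rcases hmem with h | h
          · exact Or.inr (by simp [h])
          · exact Or.inr (List.mem_cons_of_mem _ h)
        · intro e he het
          rcases List.mem_cons.mp he with rfl | he'
          · exact hdm
          · exact hmin e he' het
      · obtain ⟨m, hm, hmt, ham, hmem, hmin⟩ := ih a ha
        refine ⟨m, ?_, hmt, ham, ?_, ?_⟩
        · simpa [List.foldl_cons, bracketStepHi, hd, hlt] using hm
        · rcases hmem with h | h
          · exact Or.inl h
          · exact Or.inr (List.mem_cons_of_mem _ h)
        · intro e he het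
          rcases List.mem_cons.mp he with rfl | he'
          · exact le_trans ham (le_of_not_gt hlt)
          · exact hmin e he' het
    · obtain ⟨m, hm, hmt, ham, hmem, hmin⟩ := ih a ha
      refine ⟨m, ?_, hmt, ham, ?_, ?_⟩
      · simpa [List.foldl_cons, bracketStepHi, hd] using hm
      · rcases hmem with h | h
        · exact Or.inl h
        · exact Or.inr (List.mem_cons_of_mem _ h)
      · intro e he het
        rcases List.mem_cons.mp he with rfl | he'
        · exact absurd het hd
        · exact hmin e he' het

theorem bracket_hi_fold (target : Int) :
    ∀ (l : List Int),
      (l.foldl (bracketStepHi target) none = none ∧ ∀ d ∈ l, d < target) ∨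
      (∃ m, l.foldl (bracketStepHi target) none = some m ∧ m ∈ l ∧ target ≤ m ∧
        ∀ d ∈ l, target ≤ d → m ≤ d) := by
  intro l
  induction l with
  | nil => exact Or.inl ⟨rfl, by simp⟩
  | cons d t ih =>
    by_cases hd : target ≤ d
    · obtain ⟨m, hm, hmt, hdm, hmem, hmin⟩ := bracket_hi_fold_some target t d hd
      refine Or.inr ⟨m, ?_, ?_, hmt, ?_⟩
      · simpa [List.foldl_cons, bracketStepHi, hd] using hm
      · rcases hmem with h | h
        · exact h ▸ List.mem_cons_self
        · exact List.mem_cons_of_mem _ h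
      · intro e he het
        rcases List.mem_cons.mp he with rfl | he'
        · exact hdm
        · exact hmin e he' het
    · have hstep : List.foldl (bracketStepHi target) none (d :: t)
          = List.foldl (bracketStepHi target) none t := by
        simp [List.foldl_cons, bracketStepHi, hd]
      rcases ih with ⟨hn, hall⟩ | ⟨m, hm, hmem, hmt, hmin⟩
      · refine Or.inl ⟨hstep ▸ hn, ?_⟩
        intro e he
        rcases List.mem_cons.mp he with rfl | he'
        · exact lt_of_not_ge hd
        · exact hall e he'
      · refine Or.inr ⟨m, hstep ▸ hm, List.mem_cons_of_mem _ hmem, hmt, ?_⟩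
        intro e he het
        rcases List.mem_cons.mp he with rfl | he'
        · exact absurd het hd
        · exact hmin e he' het

-- a value that is a member and an upper/lower bound IS Python's max/min (first extremal element)
theorem bracket_max?_eq (xs : List Int) (m : Int) (hm : m ∈ xs)
    (hmax : ∀ y ∈ xs, y ≤ m) : PySem.List.max? xs (fun x => x) = some m := by
  cases h : PySem.List.max? xs (fun x => x) with
  | none =>
    rw [PySem.List.max?_eq_none_iff] at h
    simp [h] at hm
  | some k =>
    have hk := PySem.List.max?_mem h
    have h1 : m ≤ k := PySem.List.max?_isMax h m hm
    exact congrArg some (le_antisymm (hmax k hk) h1)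

theorem bracket_min?_eq (xs : List Int) (m : Int) (hm : m ∈ xs)
    (hmin : ∀ y ∈ xs, m ≤ y) : PySem.List.min? xs (fun x => x) = some m := by
  cases h : PySem.List.min? xs (fun x => x) with
  | none =>
    rw [PySem.List.min?_eq_none_iff] at h
    simp [h] at hm
  | some k =>
    have hk := PySem.List.min?_mem h
    have h1 : k ≤ m := PySem.List.min?_isMin h m hm
    exact congrArg some (le_antisymm h1 (hmin k hk))

theorem bracket_pyGet?_neg (xs : List Int) (k : Nat) (h : k + 1 ≤ xs.length) :
    PySem.List.pyGet? xs (-((k : Int) + 1)) = some (xs[xs.length - (k + 1)]'(by omega)) := by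
  have h0 : ¬ (0 ≤ -((k : Int) + 1)) := by omega
  have h1 : -((xs.length : Int)) ≤ -((k : Int) + 1) := by omega
  simp only [PySem.List.pyGet?, PySem.List.pyIdx?, if_neg h0, if_pos h1, Option.bind_some]
  have : (-(-((k : Int) + 1))).toNat = k + 1 := by omega
  rw [this, List.getElem?_eq_getElem (by omega)]

-- ===== VERDICT (by name: the statement is the Claim_ definition above) =====
theorem bracket_py_spec : Claim_equal_bracket_py := by
  intro dtes target _
  unfold Spec_bracket_py
  by_cases hnil : dtes = []
  · simp [bracket_py, bracket_py_alt, hnil]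
  · obtain ⟨s, hs⟩ : ∃ s, PySem.List.sorted (PySem.Set.ofList dtes) (fun x => x) false = s :=
      ⟨_, rfl⟩
    have hmemS : ∀ x : Int, x ∈ s ↔ x ∈ dtes := by
      intro x; rw [← hs, PySem.List.mem_sorted, PySem.Set.mem_ofList]
    have hpw : s.Pairwise (· < ·) := hs ▸ PySem.List.sorted_ofList_pairwise_lt dtes
    have hget : ∀ (i j : Nat) (hi : i < s.length) (hj : j < s.length), i < j → s[i] < s[j] :=
      List.pairwise_iff_getElem.mp hpw
    have hsnn : 0 < s.length := by
      have : dtes.head hnil ∈ s := (hmemS _).mpr (List.head_mem hnil)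
      exact List.length_pos_of_mem this
    have hg0 : PySem.List.pyGet? s 0 = some (s[0]'hsnn) := by
      have := PySem.List.pyGet?_natCast s 0
      simpa [List.getElem?_eq_getElem hsnn] using this
    rcases bracket_lo_fold target dtes with ⟨hlo, hallLo⟩ | ⟨l, hlo, hlmem, hlle, hlmax⟩
    · -- every value is strictly above target: A takes its (s[0], s[1]) branch
      have hB : bracket_py_alt dtes target
          = (let m1 := (PySem.List.min? dtes (fun x => x)).getD 0
             let rest := dtes.filter (fun d => decide (d ≠ m1))
             if rest = [] then some [m1, m1]
             else some [m1, (PySem.List.min? rest (fun x => x)).getD 0]) := by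
        simp only [bracket_py_alt, if_neg hnil, bracket_fold_pair, hlo]
      have hmin : PySem.List.min? dtes (fun x => x) = some (s[0]'hsnn) := by
        refine bracket_min?_eq dtes _ ((hmemS _).mp (List.getElem_mem hsnn)) ?_
        intro y hy
        obtain ⟨i, hi, hie⟩ := List.mem_iff_getElem.mp ((hmemS y).mpr hy)
        rcases Nat.eq_zero_or_pos i with rfl | hpos
        · exact hie ▸ le_refl _
        · exact hie ▸ le_of_lt (hget 0 i hsnn hi hpos)
      have hbe : s.filter (fun d => decide (d ≤ target)) = [] := by
        refine List.filter_eq_nil_iff.mpr ?_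
        intro x hx
        have := hallLo x ((hmemS x).mp hx)
        simpa using not_le_of_gt this
      rw [hB]
      simp only [hmin, Option.getD_some]
      by_cases hs1 : s.length = 1
      · obtain ⟨v, hv⟩ := List.length_eq_one_iff.mp hs1
        have hv0 : s[0]'hsnn = v := by simp [hv]
        have hrest : dtes.filter (fun d => decide (d ≠ s[0]'hsnn)) = [] := by
          refine List.filter_eq_nil_iff.mpr ?_
          intro x hx
          have : x ∈ s := (hmemS x).mpr hx
          rw [hv] at this
          simp [hv0, List.mem_singleton.mp this]
        rw [if_pos hrest]
        simp only [bracket_py, if_neg hnil, hs, if_pos hs1, hg0, Option.getD_some]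
      · have h2 : 2 ≤ s.length := by omega
        have hg1 : PySem.List.pyGet? s 1 = some (s[1]'(by omega)) := by
          have := PySem.List.pyGet?_natCast s 1
          simpa [List.getElem?_eq_getElem (show 1 < s.length by omega)] using this
        have hmem1 : (s[1]'(by omega)) ∈ dtes.filter (fun d => decide (d ≠ s[0]'hsnn)) := by
          refine List.mem_filter.mpr ⟨(hmemS _).mp (List.getElem_mem _), ?_⟩
          have := hget 0 1 hsnn (by omega) (by omega)
          simp
          omega
        have hrmin : PySem.List.min? (dtes.filter (fun d => decide (d ≠ s[0]'hsnn))) (fun x => x)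
            = some (s[1]'(by omega)) := by
          refine bracket_min?_eq _ _ hmem1 ?_
          intro y hy
          obtain ⟨hyd, hyne⟩ := List.mem_filter.mp hy
          obtain ⟨i, hi, hie⟩ := List.mem_iff_getElem.mp ((hmemS y).mpr hyd)
          have hine : i ≠ 0 := by
            intro h0; subst h0; rw [hie] at hyne; simp at hyne
          rcases Nat.lt_or_ge 1 i with hgt | hle
          · exact hie ▸ le_of_lt (hget 1 i (by omega) hi hgt)
          · have : i = 1 := by omega
            subst this; exact hie ▸ le_refl _
        rw [if_neg (List.ne_nil_of_mem hmem1), hrmin]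
        simp only [Option.getD_some]
        simp only [bracket_py, if_neg hnil, hs]
        rw [if_neg hs1, if_neg (fun c => c.1 hbe), if_pos hbe, hg0, hg1]
        simp only [Option.getD_some]
    · rcases bracket_hi_fold target dtes with ⟨hhi, hallHi⟩ | ⟨h, hhi, hhmem, hhge, hhmin⟩
      · -- every value is strictly below target: A takes its (s[-2], s[-1]) branch
        have hB : bracket_py_alt dtes target
            = (let m2 := (PySem.List.max? dtes (fun x => x)).getD 0
               let rest := dtes.filter (fun d => decide (d ≠ m2))
               if rest = [] then some [m2, m2]
               else some [(PySem.List.max? rest (fun x => x)).getD 0, m2]) := by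
          simp only [bracket_py_alt, if_neg hnil, bracket_fold_pair, hlo, hhi]
        have hlast : PySem.List.max? dtes (fun x => x)
            = some (s[s.length - 1]'(by omega)) := by
          refine bracket_max?_eq dtes _ ((hmemS _).mp (List.getElem_mem (by omega))) ?_
          intro y hy
          obtain ⟨i, hi, hie⟩ := List.mem_iff_getElem.mp ((hmemS y).mpr hy)
          rcases Nat.lt_or_ge i (s.length - 1) with hlt | hge
          · exact hie ▸ le_of_lt (hget i (s.length - 1) hi (by omega) hlt)
          · have : i = s.length - 1 := by omega
            subst this; exact hie ▸ le_refl _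
        have hae : s.filter (fun d => decide (target ≤ d)) = [] := by
          refine List.filter_eq_nil_iff.mpr ?_
          intro x hx
          have := hallHi x ((hmemS x).mp hx)
          simpa using not_le_of_gt this
        have hbne : l ∈ s.filter (fun d => decide (d ≤ target)) :=
          List.mem_filter.mpr ⟨(hmemS l).mpr hlmem, by simpa using hlle⟩
        rw [hB]
        simp only [hlast, Option.getD_some]
        by_cases hs1 : s.length = 1
        · obtain ⟨v, hv⟩ := List.length_eq_one_iff.mp hs1
          have hv0 : s[s.length - 1]'(by omega) = v := by simp [hv]
          have hv0' : s[0]'hsnn = v := by simp [hv]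
          have hrest : dtes.filter (fun d => decide (d ≠ s[s.length - 1]'(by omega))) = [] := by
            refine List.filter_eq_nil_iff.mpr ?_
            intro x hx
            have : x ∈ s := (hmemS x).mpr hx
            rw [hv] at this
            simp [hv0, List.mem_singleton.mp this]
          rw [if_pos hrest]
          simp only [bracket_py, if_neg hnil, hs, if_pos hs1, hg0, Option.getD_some, hv0, hv0']
        · have h2 : 2 ≤ s.length := by omega
          have hgm1 : PySem.List.pyGet? s (-1) = some (s[s.length - 1]'(by omega)) := by
            have := bracket_pyGet?_neg s 0 (by omega)
            norm_num at this
            exact this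
          have hgm2 : PySem.List.pyGet? s (-2) = some (s[s.length - 2]'(by omega)) := by
            have := bracket_pyGet?_neg s 1 (by omega)
            norm_num at this
            exact this
          have hmem2 : (s[s.length - 2]'(by omega))
              ∈ dtes.filter (fun d => decide (d ≠ s[s.length - 1]'(by omega))) := by
            refine List.mem_filter.mpr ⟨(hmemS _).mp (List.getElem_mem _), ?_⟩
            have := hget (s.length - 2) (s.length - 1) (by omega) (by omega) (by omega)
            simp
            omega
          have hrmax : PySem.List.max?
              (dtes.filter (fun d => decide (d ≠ s[s.length - 1]'(by omega)))) (fun x => x)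
              = some (s[s.length - 2]'(by omega)) := by
            refine bracket_max?_eq _ _ hmem2 ?_
            intro y hy
            obtain ⟨hyd, hyne⟩ := List.mem_filter.mp hy
            obtain ⟨i, hi, hie⟩ := List.mem_iff_getElem.mp ((hmemS y).mpr hyd)
            have hine : i ≠ s.length - 1 := by
              intro h0; subst h0; rw [hie] at hyne; simp at hyne
            rcases Nat.lt_or_ge i (s.length - 2) with hlt | hge
            · exact hie ▸ le_of_lt (hget i (s.length - 2) hi (by omega) hlt)
            · have : i = s.length - 2 := by omega
              subst this; exact hie ▸ le_refl _
          rw [if_neg (List.ne_nil_of_mem hmem2), hrmax]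
          simp only [Option.getD_some]
          simp only [bracket_py, if_neg hnil, hs]
          rw [if_neg hs1, if_neg (fun c => c.2 hae), if_neg (List.ne_nil_of_mem hbne), hgm1, hgm2]
          simp only [Option.getD_some]
      · -- both sides populated: A takes its (max below, min above) branch
        have hB : bracket_py_alt dtes target = some [l, h] := by
          simp only [bracket_py_alt, if_neg hnil, bracket_fold_pair, hlo, hhi]
        rw [hB]
        by_cases hs1 : s.length = 1
        · obtain ⟨v, hv⟩ := List.length_eq_one_iff.mp hs1
          have hl : l = v := by
            have := (hmemS l).mpr hlmem; rw [hv] at this; exact List.mem_singleton.mp this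
          have hh : h = v := by
            have := (hmemS h).mpr hhmem; rw [hv] at this; exact List.mem_singleton.mp this
          have hv0 : s[0]'hsnn = v := by simp [hv]
          simp only [bracket_py, if_neg hnil, hs, if_pos hs1, hg0, Option.getD_some, hv0, hl, hh]
        · have hbne : l ∈ s.filter (fun d => decide (d ≤ target)) :=
            List.mem_filter.mpr ⟨(hmemS l).mpr hlmem, by simpa using hlle⟩
          have hane : h ∈ s.filter (fun d => decide (target ≤ d)) :=
            List.mem_filter.mpr ⟨(hmemS h).mpr hhmem, by simpa using hhge⟩
          have hbmax : PySem.List.max? (s.filter (fun d => decide (d ≤ target))) (fun x => x)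
              = some l := by
            refine bracket_max?_eq _ _ hbne ?_
            intro y hy
            obtain ⟨hys, hyt⟩ := List.mem_filter.mp hy
            exact hlmax y ((hmemS y).mp hys) (by simpa using hyt)
          have hamin : PySem.List.min? (s.filter (fun d => decide (target ≤ d))) (fun x => x)
              = some h := by
            refine bracket_min?_eq _ _ hane ?_
            intro y hy
            obtain ⟨hys, hyt⟩ := List.mem_filter.mp hy
            exact hhmin y ((hmemS y).mp hys) (by simpa using hyt)
          simp only [bracket_py, if_neg hnil, hs]
          rw [if_neg hs1, if_pos ⟨List.ne_nil_of_mem hbne, List.ne_nil_of_mem hane⟩, hbmax, hamin]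
          simp only [Option.getD_some]
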